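-- pv_equiv track=rewrite | github.com/gobitsnbytes/indiainnovates-automation | ii2026_evaluator.py | _take_until_next_heading
-- ===== SOURCE A (Python) =====
-- def _take_until_next_heading(text: str) -> str:
--     """
--     From an inline-extracted block, take text until what looks like
--     the next section heading (all-caps line, or line ending in ':').
--     """
--     lines = text.splitlines()
--     result: list[str] = []
--     for line in lines:
--         stripped = line.strip()
--         if not stripped:
--             result.append(line)
--             continue
--         is_heading = (
--             (stripped.isupper() and len(stripped) > 3)
--             or (stripped.endswith(":") and len(stripped.split()) <= 5)
--         )
--         if is_heading and result:
--             break
--         result.append(line)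
--     return "\n".join(result).strip()
-- ===== SOURCE B (Python) =====
-- def _is_heading(line):
--     s = line.strip()
--     return bool(s) and (
--         (s.isupper() and len(s) > 3)
--         or (s.endswith(":") and len(s.split()) <= 5)
--     )
--
--
-- def _take_until_next_heading(text: str) -> str:
--     lines = text.splitlines()
--     cut = len(lines)
--     for i in range(1, len(lines)):
--         if _is_heading(lines[i]):
--             cut = i
--             break
--     return "\n".join(lines[:cut]).strip()
-- ===== Notes on version B (the rewrite author's own statement) =====
-- stated objective: simpler
-- what changed: Replaces the append-and-break accumulator loop by boundary-finding: compute the first heading index >= 1 (the heading test factored into a helper), then slice and join the prefix.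
import Mathlib
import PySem

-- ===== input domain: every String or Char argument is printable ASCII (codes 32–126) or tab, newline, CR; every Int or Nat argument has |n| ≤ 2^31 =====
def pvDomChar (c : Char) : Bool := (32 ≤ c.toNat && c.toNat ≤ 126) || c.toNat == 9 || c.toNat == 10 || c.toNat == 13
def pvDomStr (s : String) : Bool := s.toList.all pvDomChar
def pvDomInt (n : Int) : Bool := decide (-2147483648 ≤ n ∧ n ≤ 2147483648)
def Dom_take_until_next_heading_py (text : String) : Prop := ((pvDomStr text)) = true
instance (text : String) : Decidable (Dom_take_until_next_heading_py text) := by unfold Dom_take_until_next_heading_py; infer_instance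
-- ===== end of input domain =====

-- B replaces A's append-and-break accumulator loop by boundary-finding (first heading index ≥ 1) plus slice-and-join; objective: simpler.


-- ===== PORT A =====
-- str.isupper(): at least one cased character and no lowercase one; exact on the ASCII domain,
-- where the cased characters are exactly the alphabetic ones.
def pyStrIsUpper (s : String) : Bool :=
  s.toList.any (fun c => PySem.Chars.isalpha c) && s.toList.all (fun c => !PySem.Chars.islower c)

-- the boolean 'is_heading' expression, shared verbatim by both Pythons
def pvHeadingTest (s : String) : Bool :=
  (pyStrIsUpper s && decide (3 < PySem.Str.len s))
    || (PySem.Str.endswith s ":" && decide ((PySem.Str.split₀ s).length ≤ 5))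

-- the 'for line in lines: … break …' loop of A over the accumulator 'result'
def pvLoopA : List String → List String → List String
  | [], result => result
  | line :: rest, result =>
      let stripped := PySem.Str.strip line
      if stripped = "" then pvLoopA rest (result ++ [line])
      else
        let is_heading := pvHeadingTest stripped
        if is_heading && !result.isEmpty then result
        else pvLoopA rest (result ++ [line])

def take_until_next_heading_py (text : String) : String :=
  let lines := PySem.Str.splitlines text
  PySem.Str.strip (PySem.Str.join "\n" (pvLoopA lines []))

-- ===== PORT B =====
-- _is_heading of Source B
def pvIsHeadingB (line : String) : Bool :=
  let s := PySem.Str.strip line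
  !(s = "") && pvHeadingTest s

-- Source B's 'for i in range(1, len(lines)): if _is_heading(lines[i]): cut = i; break',
-- ported as a scan of lines[1:] carrying the index i (none = the loop never broke)
def pvFindCut : List String → Nat → Option Nat
  | [], _ => none
  | l :: rest, i => if pvIsHeadingB l then some i else pvFindCut rest (i + 1)

def take_until_next_heading_py_alt (text : String) : String :=
  let lines := PySem.Str.splitlines text
  let cut := (pvFindCut (lines.drop 1) 1).getD lines.length
  PySem.Str.strip (PySem.Str.join "\n" (lines.take cut))

-- ===== PRECONDITION & SPEC =====
def Spec_take_until_next_heading_py (text : String) (out : String) : Prop := out = take_until_next_heading_py_alt text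
instance (text : String) (out : String) : Decidable (Spec_take_until_next_heading_py text out) := by unfold Spec_take_until_next_heading_py; infer_instance

-- ===== CLAIM (what is proved, stated in full; the proofs are below) =====
def Claim_equal_take_until_next_heading_py : Prop := ∀ (text : String), Dom_take_until_next_heading_py text → Spec_take_until_next_heading_py text (take_until_next_heading_py text)

-- ===== LEMMAS AND PROOFS =====

-- the lines kept after the first one: take until the first heading line
def pvTail : List String → List String
  | [] => []
  | l :: rest => if pvIsHeadingB l then [] else l :: pvTail rest

theorem pvLoopA_eq (rest : List String) :
    ∀ acc : List String, acc ≠ [] → pvLoopA rest acc = acc ++ pvTail rest := by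
  induction rest with
  | nil => intro acc _; simp [pvLoopA, pvTail]
  | cons l rest ih =>
    intro acc hacc
    by_cases hs : PySem.Str.strip l = ""
    · have hh : pvIsHeadingB l = false := by simp [pvIsHeadingB, hs]
      simp only [pvLoopA, hs, pvTail, hh, if_neg Bool.false_ne_true,
        ih (acc ++ [l]) (by simp)]
      simp
    · by_cases hH : pvHeadingTest (PySem.Str.strip l) = true
      · have hh : pvIsHeadingB l = true := by simp [pvIsHeadingB, hs, hH]
        have hne : acc.isEmpty = false := by simpa [List.isEmpty_iff] using hacc
        simp [pvLoopA, hs, hH, hne, pvTail, hh]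
      · have hh : pvIsHeadingB l = false := by simp [pvIsHeadingB, hs, hH]
        have hHf : pvHeadingTest (PySem.Str.strip l) = false := by simpa using hH
        simp only [pvLoopA, hs, hHf, Bool.false_and]
        rw [ih (acc ++ [l]) (by simp)]
        simp [pvTail, hh]

theorem pvFindCut_getD (rest : List String) :
    ∀ n : Nat, (pvFindCut rest n).getD (n + rest.length) = n + (pvTail rest).length := by
  induction rest with
  | nil => intro n; simp [pvFindCut, pvTail]
  | cons l rest ih =>
    intro n
    by_cases h : pvIsHeadingB l = true
    · simp [pvFindCut, pvTail, h]
    · have h' : pvIsHeadingB l = false := by simpa using h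
      have e : n + (rest.length + 1) = n + 1 + rest.length := by omega
      simp only [pvFindCut, h', if_neg Bool.false_ne_true, pvTail, List.length_cons]
      rw [e, ih (n + 1)]
      omega

theorem pvTake_pvTail (rest : List String) : rest.take (pvTail rest).length = pvTail rest := by
  induction rest with
  | nil => simp [pvTail]
  | cons l rest ih =>
    by_cases h : pvIsHeadingB l = true
    · simp [pvTail, h]
    · have h' : pvIsHeadingB l = false := by simpa using h
      simp [pvTail, h', ih]

-- ===== VERDICT (by name: the statement is the Claim_ definition above) =====
theorem take_until_next_heading_py_spec : Claim_equal_take_until_next_heading_py := by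
  intro text _
  unfold Spec_take_until_next_heading_py
  cases hl : PySem.Str.splitlines text with
  | nil => simp [take_until_next_heading_py, take_until_next_heading_py_alt, hl, pvLoopA, pvFindCut]
  | cons l rest =>
    have hcut : (pvFindCut ((l :: rest).drop 1) 1).getD (l :: rest).length
        = 1 + (pvTail rest).length := by
      simpa [Nat.add_comm] using pvFindCut_getD rest 1
    have htake : (l :: rest).take (1 + (pvTail rest).length) = l :: pvTail rest := by
      simp [List.take_succ_cons, pvTake_pvTail, Nat.add_comm]
    have hA : pvLoopA (l :: rest) [] = l :: pvTail rest := by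
      by_cases hs : PySem.Str.strip l = ""
      · simp only [pvLoopA, hs, List.nil_append]
        exact pvLoopA_eq rest [l] (by simp)
      · simp only [pvLoopA, if_neg hs, List.isEmpty_nil, Bool.not_true, Bool.and_false,
          if_neg Bool.false_ne_true, List.nil_append]
        exact pvLoopA_eq rest [l] (by simp)
    simp only [take_until_next_heading_py, take_until_next_heading_py_alt, hl]
    rw [hcut, htake, hA]
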